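-- pv_equiv track=rewrite | github.com/anoopkr10/aapkapainter-tasks | duplicate.py | find_first_duplicates
-- ===== SOURCE A (Python) =====
-- def find_first_duplicates(nums):
--     num_set = set()
--     no_duplicate = 0
--
--     for i in range(len(nums)):
--         if nums[i] in num_set:
--             return nums[i]
--         else:
--             num_set.add(nums[i])
--     return no_duplicate
-- ===== SOURCE B (Python) =====
-- def find_first_duplicates(nums):
--     first = {}
--     for i, v in enumerate(nums):
--         if v not in first:
--             first[v] = i
--     for i, v in enumerate(nums):
--         if first[v] < i:
--             return v
--     return 0
-- ===== Notes on version B (the rewrite author's own statement) =====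
-- stated objective: alternative
-- what changed: Replaced the single-pass growing-set scan with two staged passes: first build a dict mapping each value to its first-occurrence index, then scan for the first position whose value's first occurrence is strictly earlier.
import Mathlib
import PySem

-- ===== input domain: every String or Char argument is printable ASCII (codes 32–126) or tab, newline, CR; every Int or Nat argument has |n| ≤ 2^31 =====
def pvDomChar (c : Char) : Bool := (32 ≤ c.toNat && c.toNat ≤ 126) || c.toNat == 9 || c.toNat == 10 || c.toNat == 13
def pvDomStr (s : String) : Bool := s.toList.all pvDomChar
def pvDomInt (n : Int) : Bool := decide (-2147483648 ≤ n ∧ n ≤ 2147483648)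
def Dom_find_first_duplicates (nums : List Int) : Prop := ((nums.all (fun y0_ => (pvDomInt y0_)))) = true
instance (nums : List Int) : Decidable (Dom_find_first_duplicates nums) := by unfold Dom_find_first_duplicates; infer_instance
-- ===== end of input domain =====

-- B replaces A's single-pass growing-set scan with two staged passes: a first pass
-- building a dict of first-occurrence indices, then a scan for the first position whose
-- value's first occurrence is strictly earlier (alternative decomposition, same cost).


-- ===== PORT A =====
-- loop 'for i in range(len(nums))' carrying the growing num_set
def pvAuxA : List Int → PySem.Set Int → Int
  | [], _ => 0                                   -- return no_duplicate (= 0)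
  | x :: xs, num_set =>
      if PySem.Set.contains num_set x then x     -- if nums[i] in num_set: return nums[i]
      else pvAuxA xs (PySem.Set.add num_set x)   -- else: num_set.add(nums[i])

def find_first_duplicates (nums : List Int) : Int := pvAuxA nums PySem.Set.empty

-- ===== PORT B =====
-- first pass: 'for i, v in enumerate(nums): if v not in first: first[v] = i'
def pvBuildFirst : List (Int × Int) → PySem.Dict Int Int → PySem.Dict Int Int
  | [], first => first
  | (i, v) :: rest, first =>
      if first.contains v then pvBuildFirst rest first
      else pvBuildFirst rest (first.insert v i)

-- second pass: 'for i, v in enumerate(nums): if first[v] < i: return v'; first[v] is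
-- always present here, so 'getD … 0' is exact for Python's 'first[v]'
def pvScanFirst (first : PySem.Dict Int Int) : List (Int × Int) → Int
  | [] => 0
  | (i, v) :: rest => if first.getD v 0 < i then v else pvScanFirst first rest

def find_first_duplicates_alt (nums : List Int) : Int :=
  pvScanFirst (pvBuildFirst (PySem.List.enumerate nums) PySem.Dict.empty)
    (PySem.List.enumerate nums)

-- ===== PRECONDITION & SPEC =====
def Spec_find_first_duplicates (nums : List Int) (out : Int) : Prop := out = find_first_duplicates_alt nums
instance (nums : List Int) (out : Int) : Decidable (Spec_find_first_duplicates nums out) := by unfold Spec_find_first_duplicates; infer_instance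

-- ===== CLAIM (what is proved, stated in full; the proofs are below) =====
def Claim_equal_find_first_duplicates : Prop := ∀ (nums : List Int), Dom_find_first_duplicates nums → Spec_find_first_duplicates nums (find_first_duplicates nums)

-- ===== LEMMAS AND PROOFS =====

-- the build pass computes the first-occurrence index of every value of the list
theorem pvBuildFirst_get? (xs : List Int) : ∀ (p : List Int) (d : PySem.Dict Int Int),
    (∀ v, d.get? v = if v ∈ p then some ((p.idxOf v : Int)) else none) →
    ∀ v, (pvBuildFirst (PySem.List.enumerate xs (p.length : Int)) d).get? v
          = if v ∈ p ++ xs then some (((p ++ xs).idxOf v : Int)) else none := by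
  induction xs with
  | nil => intro p d h v; simpa [PySem.List.enumerate_nil, pvBuildFirst] using h v
  | cons x xs ih =>
      intro p d h v
      rw [PySem.List.enumerate_cons]
      simp only [pvBuildFirst]
      have hx := h x
      by_cases hmem : x ∈ p
      · have hc : d.contains x = true := by
          rw [PySem.Dict.contains_eq_isSome_get?, hx]; simp [hmem]
        rw [hc, if_pos rfl]
        have hrec := ih (p ++ [x]) d (by
          intro w
          have hw := h w
          by_cases hwp : w ∈ p
          · rw [if_pos (by simp [hwp]), List.idxOf_append_of_mem hwp]
            simpa [hwp] using hw
          · by_cases hwx : w = x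
            · subst hwx; exact absurd hmem hwp
            · rw [if_neg (by simp [hwp, hwx])]; simpa [hwp] using hw)
        simp only [List.length_append, List.length_cons, List.length_nil] at hrec
        have hcast : ((p.length + 1 : Nat) : Int) = (p.length : Int) + 1 := by push_cast; ring
        rw [hcast] at hrec
        simpa [List.append_assoc] using hrec v
      · have hc : d.contains x = false := by
          rw [PySem.Dict.contains_eq_isSome_get?, hx]; simp [hmem]
        rw [hc]
        simp only [Bool.false_eq_true, if_false]
        have hrec := ih (p ++ [x]) (d.insert x (p.length : Int)) (by
          intro w
          rw [PySem.Dict.get?_insert]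
          by_cases hwx : w = x
          · subst hwx
            rw [if_pos rfl, if_pos (by simp), List.idxOf_append_of_notMem hmem]
            simp
          · rw [if_neg hwx]
            have hw := h w
            by_cases hwp : w ∈ p
            · rw [if_pos (by simp [hwp]), List.idxOf_append_of_mem hwp]
              simpa [hwp] using hw
            · rw [if_neg (by simp [hwp, hwx])]; simpa [hwp] using hw)
        simp only [List.length_append, List.length_cons, List.length_nil] at hrec
        have hcast : ((p.length + 1 : Nat) : Int) = (p.length : Int) + 1 := by push_cast; ring
        rw [hcast] at hrec
        simpa [List.append_assoc] using hrec v

-- the scan pass asks 'first occurrence of v earlier than i', which is exactly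
-- 'v already seen', i.e. A's membership test in the growing set
theorem pvScan_eq_pvAuxA (nums : List Int)
    (d : PySem.Dict Int Int)
    (hd : ∀ v, d.get? v = if v ∈ nums then some ((nums.idxOf v : Int)) else none) :
    ∀ (xs p : List Int) (s : PySem.Set Int), nums = p ++ xs →
    (∀ y, PySem.Set.contains s y = decide (y ∈ p)) →
    pvScanFirst d (PySem.List.enumerate xs (p.length : Int)) = pvAuxA xs s := by
  intro xs
  induction xs with
  | nil => intro p s _ _; simp [PySem.List.enumerate_nil, pvScanFirst, pvAuxA]
  | cons x xs ih =>
      intro p s hsplit hs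
      rw [PySem.List.enumerate_cons]
      simp only [pvScanFirst, pvAuxA, hs x]
      have hxmem : x ∈ nums := by rw [hsplit]; simp
      have hget : d.getD x 0 = (nums.idxOf x : Int) := by
        rw [PySem.Dict.getD_eq_get?_getD, hd x, if_pos hxmem]; rfl
      have hiff : (d.getD x 0 < (p.length : Int)) ↔ x ∈ p := by
        rw [hget, hsplit]
        by_cases hxp : x ∈ p
        · rw [List.idxOf_append_of_mem hxp]
          have := List.idxOf_lt_length_of_mem hxp
          constructor
          · intro _; exact hxp
          · intro _; exact_mod_cast this
        · rw [List.idxOf_append_of_notMem hxp]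
          simp [hxp, List.idxOf_cons_self]
      by_cases hxp : x ∈ p
      · rw [if_pos (hiff.mpr hxp), if_pos (by simp [hxp])]
      · have hnot : ¬ (d.getD x 0 < (p.length : Int)) := fun h => hxp (hiff.mp h)
        rw [if_neg hnot, if_neg (by simp [hxp])]
        have hrec := ih (p ++ [x]) (PySem.Set.add s x)
          (by rw [hsplit, List.append_assoc]; rfl)
          (by
            intro y
            have h1 : (y ∈ s) ↔ (y ∈ p) := by
              rw [← PySem.Set.contains_iff, hs y, decide_eq_true_iff]
            have hmem : (y ∈ PySem.Set.add s x) ↔ (y ∈ p ++ [x]) := by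
              rw [PySem.Set.mem_add, List.mem_append, h1]; simp
            simp only [PySem.Set.contains, List.contains_eq_mem]
            exact decide_eq_decide.mpr hmem)
        simp only [List.length_append, List.length_cons, List.length_nil] at hrec
        have hcast : ((p.length + 1 : Nat) : Int) = (p.length : Int) + 1 := by push_cast; ring
        rw [hcast] at hrec
        exact hrec

-- ===== VERDICT (by name: the statement is the Claim_ definition above) =====
theorem find_first_duplicates_spec : Claim_equal_find_first_duplicates := by
  intro nums _
  unfold Spec_find_first_duplicates find_first_duplicates find_first_duplicates_alt
  have hd := pvBuildFirst_get? nums [] PySem.Dict.empty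
    (by intro v; simp [PySem.Dict.get?_empty])
  simp only [List.length_nil, Nat.cast_zero, List.nil_append] at hd
  exact (pvScan_eq_pvAuxA nums _ hd nums [] PySem.Set.empty rfl
    (by intro y; simp [PySem.Set.contains, PySem.Set.empty])).symm
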